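-- pv_equiv track=rewrite | github.com/gautambp/HackerRank | Master/python3/accessory-collection.py | acessoryCollection
-- ===== SOURCE A (Python) =====
-- def acessoryCollection(L, A, N, D):
--     #
--     # Write your code here.
--     #
--     if D > A:
--         return 'SAD'
--     total = 0
--     for i in range(A, A-N, -1):
--         if L <= 0:
--             break
--         total += i*D
--         L = L-1
--     return str(total)
-- ===== SOURCE B (Python) =====
-- def acessoryCollection(L, A, N, D):
--     if D > A:
--         return 'SAD'
--     k = max(0, min(N, L))
--     return str(D * (A * k - k * (k - 1) // 2))
-- ===== Notes on version B (the rewrite author's own statement) =====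
-- stated objective: faster
-- what changed: replaced the O(N) descending loop (capped by L) with the closed-form arithmetic-series sum over k = max(0, min(N, L)) terms
import Mathlib
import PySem

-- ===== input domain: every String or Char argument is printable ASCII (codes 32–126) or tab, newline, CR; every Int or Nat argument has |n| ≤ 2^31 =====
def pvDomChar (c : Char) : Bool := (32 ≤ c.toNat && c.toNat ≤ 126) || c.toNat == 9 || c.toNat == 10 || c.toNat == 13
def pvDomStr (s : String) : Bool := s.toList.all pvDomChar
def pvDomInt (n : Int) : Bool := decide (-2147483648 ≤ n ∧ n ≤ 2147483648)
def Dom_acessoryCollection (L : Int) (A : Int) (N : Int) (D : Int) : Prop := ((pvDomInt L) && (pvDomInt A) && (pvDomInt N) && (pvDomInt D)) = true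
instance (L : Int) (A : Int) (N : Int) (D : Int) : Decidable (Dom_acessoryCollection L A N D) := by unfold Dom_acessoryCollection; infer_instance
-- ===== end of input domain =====

-- B replaces A's O(min(N,L)) descending loop with the closed-form arithmetic-series sum (objective: faster).

-- ===== PORT A =====
-- the for-loop with its break over the LAZY range(A, A-N, -1): the first argument is the
-- number of range elements still to come ((A - (A-N)).toNat, i.e. max(N,0)), the second the current i
def acLoop (D : Int) : Nat → Int → Int → Int → Int
  | 0, _, tot, _ => tot
  | m + 1, i, tot, l => if l ≤ 0 then tot else acLoop D m (i - 1) (tot + i * D) (l - 1)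

def acessoryCollection (L : Int) (A : Int) (N : Int) (D : Int) : String :=
  if D > A then "SAD"
  else PySem.Int.toStr (acLoop D (A - (A - N)).toNat A 0 L)

-- ===== PORT B =====
def acessoryCollection_alt (L : Int) (A : Int) (N : Int) (D : Int) : String :=
  if D > A then "SAD"
  else
    let k := max 0 (min N L)
    PySem.Int.toStr (D * (A * k - PySem.Int.floordiv (k * (k - 1)) 2))

-- ===== PRECONDITION & SPEC =====
def Spec_acessoryCollection (L : Int) (A : Int) (N : Int) (D : Int) (out : String) : Prop := out = acessoryCollection_alt L A N D
instance (L : Int) (A : Int) (N : Int) (D : Int) (out : String) : Decidable (Spec_acessoryCollection L A N D out) := by unfold Spec_acessoryCollection; infer_instance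

-- ===== CLAIM (what is proved, stated in full; the proofs are below) =====
def Claim_equal_acessoryCollection : Prop := ∀ (L : Int) (A : Int) (N : Int) (D : Int), Dom_acessoryCollection L A N D → Spec_acessoryCollection L A N D (acessoryCollection L A N D)

-- ===== LEMMAS AND PROOFS =====

-- sum of the k integers a, a-1, …, a-k+1
def sumDesc (a : Int) : Nat → Int
  | 0 => 0
  | k + 1 => a + sumDesc (a - 1) k

theorem acLoop_eq (D : Int) : ∀ (m : Nat) (a tot L : Int),
    acLoop D m a tot L = tot + D * sumDesc a (min m L.toNat) := by
  intro m
  induction m with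
  | zero =>
    intro a tot L
    simp [acLoop, sumDesc]
  | succ m ih =>
    intro a tot L
    by_cases hL : L ≤ 0
    · have : min (m + 1) L.toNat = 0 := by omega
      simp [acLoop, hL, this, sumDesc]
    · simp only [acLoop, if_neg hL]
      rw [ih (a - 1) (tot + a * D) (L - 1)]
      have hk : min (m + 1) L.toNat = min m (L - 1).toNat + 1 := by omega
      rw [hk]
      simp [sumDesc]
      ring

theorem sumDesc_closed (n : Nat) : ∀ (a : Int),
    sumDesc a n = a * (n : Int) - ((n : Int) * ((n : Int) - 1)) / 2 := by
  induction n with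
  | zero => intro a; simp [sumDesc]
  | succ n ih =>
    intro a
    have hd : ((n : Int) + 1) * ((n : Int) + 1 - 1) = (n : Int) * ((n : Int) - 1) + 2 * n := by ring
    have heven : (2 : Int) ∣ (n : Int) * ((n : Int) - 1) := (Int.even_mul_pred_self (n : Int)).two_dvd
    obtain ⟨p, hp⟩ := heven
    simp only [sumDesc, ih]
    push_cast
    rw [hd, hp]
    have h1 : (2 * p + 2 * (n : Int)) / 2 = p + n := by omega
    have h2 : (2 * p) / 2 = p := by omega
    rw [h1, h2]
    ring

-- ===== VERDICT (by name: the statement is the Claim_ definition above) =====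
theorem acessoryCollection_spec : Claim_equal_acessoryCollection := by
  intro L A N D _
  unfold Spec_acessoryCollection acessoryCollection acessoryCollection_alt
  by_cases hda : D > A
  · simp [hda]
  · simp only [if_neg hda]
    congr 1
    have htot : acLoop D (A - (A - N)).toNat A 0 L
        = D * sumDesc A (max 0 (min N L)).toNat := by
      rw [acLoop_eq D (A - (A - N)).toNat A 0 L]
      have : min (A - (A - N)).toNat L.toNat = (max 0 (min N L)).toNat := by omega
      rw [this]
      ring
    rw [htot, sumDesc_closed]
    have hk0 : (0 : Int) ≤ max 0 (min N L) := le_max_left 0 _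
    have hcast : (((max 0 (min N L)).toNat : Nat) : Int) = max 0 (min N L) := by omega
    rw [hcast, PySem.Int.floordiv_eq_ediv_of_pos (by norm_num)]
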